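-- pv_equiv track=rewrite | github.com/soyan1999/tinystm-pm | bench/stamp/yada/inputs/generate_ladder.py | genLadder
-- ===== SOURCE A (Python) =====
-- def genLadder(nbVertices):
--     resX = []
--     resY = []
--     kX = 1
--     kX_update = 2
--     kY = -1
--     kY_update = 2
--     for i in range(nbVertices):
--         kX += kX_update
--         if (kX >= nbVertices):
--             kX_update = -2
--             kX = nbVertices
--         if (kX <= 0):
--             kX = 1
--         resX += [kX]
--         kY += kY_update
--         if (kY >= nbVertices):
--             kY_update = -2
--             kY = nbVertices
--         resY += [kY]
--     return [(x,y,1) for x, y in zip(resX, resY)]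
-- ===== SOURCE B (Python) =====
-- def genLadder(nbVertices):
--     n = nbVertices
--     # peak indices: smallest i >= 0 with 3+2i >= n (for x) resp. 1+2i >= n (for y)
--     p = max(0, -((3 - n) // 2))
--     q = max(0, -((1 - n) // 2))
--     def x(i):
--         return 3 + 2 * i if i < p else max(1, n - 2 * (i - p))
--     def y(i):
--         return 1 + 2 * i if i < q else n - 2 * (i - q)
--     return [(x(i), y(i), 1) for i in range(n)]
-- ===== Notes on version B (the rewrite author's own statement) =====
-- stated objective: simpler
-- what changed: Replaces the state-threading loop (two mutable values plus two mutable step variables with clamping) by closed-form per-index formulas: peak indices p,q are computed by ceiling division and each coordinate is a direct triangle-wave expression of i.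
import Mathlib
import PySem

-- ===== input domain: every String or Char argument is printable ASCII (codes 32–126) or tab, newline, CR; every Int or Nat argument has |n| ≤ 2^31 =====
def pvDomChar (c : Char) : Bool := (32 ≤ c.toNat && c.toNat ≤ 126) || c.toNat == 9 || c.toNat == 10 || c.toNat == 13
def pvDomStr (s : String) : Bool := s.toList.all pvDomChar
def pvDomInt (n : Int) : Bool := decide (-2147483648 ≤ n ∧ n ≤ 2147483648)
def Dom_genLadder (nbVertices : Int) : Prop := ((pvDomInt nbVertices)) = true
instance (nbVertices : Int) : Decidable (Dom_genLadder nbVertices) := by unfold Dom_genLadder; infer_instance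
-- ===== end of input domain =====

-- B replaces A's mutable state-threading loop by closed-form per-index triangle-wave formulas (simpler decomposition, same O(n) cost).

-- ===== PORT A =====
-- one loop iteration: state (resX, resY, kX, kX_update, kY, kY_update)
def ladStep (n : Int) (s : List Int × List Int × Int × Int × Int × Int) (_i : Int) :
    List Int × List Int × Int × Int × Int × Int :=
  let kX1 := s.2.2.1 + s.2.2.2.1
  let kXu := if kX1 ≥ n then (-2 : Int) else s.2.2.2.1
  let kX2 := if kX1 ≥ n then n else kX1
  let kX3 := if kX2 ≤ 0 then 1 else kX2
  let kY1 := s.2.2.2.2.1 + s.2.2.2.2.2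
  let kYu := if kY1 ≥ n then (-2 : Int) else s.2.2.2.2.2
  let kY2 := if kY1 ≥ n then n else kY1
  (s.1 ++ [kX3], s.2.1 ++ [kY2], kX3, kXu, kY2, kYu)

def genLadder (nbVertices : Int) : List (Int × Int × Int) :=
  let s := (PySem.List.pyRange 0 nbVertices 1).foldl (ladStep nbVertices) ([], [], 1, 2, -1, 2)
  (s.1.zip s.2.1).map (fun xy => (xy.1, xy.2, 1))

-- ===== PORT B =====
def ladP (n : Int) : Int := max 0 (-(PySem.Int.floordiv (3 - n) 2))
def ladQ (n : Int) : Int := max 0 (-(PySem.Int.floordiv (1 - n) 2))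
def ladX (n i : Int) : Int := if i < ladP n then 3 + 2 * i else max 1 (n - 2 * (i - ladP n))
def ladY (n i : Int) : Int := if i < ladQ n then 1 + 2 * i else n - 2 * (i - ladQ n)

def genLadder_alt (nbVertices : Int) : List (Int × Int × Int) :=
  (PySem.List.pyRange 0 nbVertices 1).map (fun i => (ladX nbVertices i, ladY nbVertices i, 1))

-- ===== PRECONDITION & SPEC =====
def Spec_genLadder (nbVertices : Int) (out : List (Int × Int × Int)) : Prop := out = genLadder_alt nbVertices
instance (nbVertices : Int) (out : List (Int × Int × Int)) : Decidable (Spec_genLadder nbVertices out) := by unfold Spec_genLadder; infer_instance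

-- ===== CLAIM (what is proved, stated in full; the proofs are below) =====
def Claim_equal_genLadder : Prop := ∀ (nbVertices : Int), Dom_genLadder nbVertices → Spec_genLadder nbVertices (genLadder nbVertices)

-- ===== LEMMAS AND PROOFS =====

-- loop-state characterisation: value and update variables after k iterations
def ladSX (n : Int) (k : Nat) : Int := if k = 0 then 1 else ladX n ((k : Int) - 1)
def ladSY (n : Int) (k : Nat) : Int := if k = 0 then -1 else ladY n ((k : Int) - 1)
def ladUX (n : Int) (k : Nat) : Int := if (k : Int) ≤ ladP n then 2 else -2
def ladUY (n : Int) (k : Nat) : Int := if (k : Int) ≤ ladQ n then 2 else -2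

theorem ladP_eq (n : Int) : ladP n = max 0 (-((3 - n) / 2)) := by
  unfold ladP
  rw [PySem.Int.floordiv_eq_ediv_of_pos (by omega)]

theorem ladQ_eq (n : Int) : ladQ n = max 0 (-((1 - n) / 2)) := by
  unfold ladQ
  rw [PySem.Int.floordiv_eq_ediv_of_pos (by omega)]

theorem lad_invariant (n : Int) (hn : 1 ≤ n) (k : Nat) (hk : (k : Int) ≤ n) :
    (PySem.List.pyRange 0 (k : Int) 1).foldl (ladStep n) ([], [], 1, 2, -1, 2) =
      ((PySem.List.pyRange 0 (k : Int) 1).map (ladX n),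
       (PySem.List.pyRange 0 (k : Int) 1).map (ladY n),
       ladSX n k, ladUX n k, ladSY n k, ladUY n k) := by
  induction k with
  | zero =>
      simp [PySem.List.pyRange_one_eq_nil (by omega : (0:Int) ≤ 0), ladSX, ladSY, ladUX, ladUY,
        ladP_eq, ladQ_eq]
  | succ k ih =>
      have hk' : (k : Int) ≤ n := by push_cast at hk ⊢; omega
      have hsplit : PySem.List.pyRange 0 ((k : Nat) + 1 : Int) 1 =
          PySem.List.pyRange 0 (k : Int) 1 ++ [(k : Int)] :=
        PySem.List.pyRange_one_succ_right (by omega)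
      have hcast : (((k + 1 : Nat)) : Int) = (k : Int) + 1 := by push_cast; ring
      have hkn : (k : Int) < n := by push_cast at hk; omega
      rw [hcast, hsplit, List.foldl_append, ih hk', List.map_append, List.map_append]
      simp only [List.foldl, List.map]
      unfold ladStep
      simp only [Prod.mk.injEq]
      refine ⟨?_, ?_, ?_, ?_, ?_, ?_⟩ <;>
        first
        | (congr 1
           simp only [List.cons.injEq, and_true]
           simp only [ladSX, ladSY, ladUX, ladUY, ladX, ladY, ladP_eq, ladQ_eq]
           split_ifs <;> omega)
        | (simp only [ladSX, ladSY, ladUX, ladUY, ladX, ladY, ladP_eq, ladQ_eq]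
           push_cast
           split_ifs <;> omega)

theorem genLadder_eq_alt (n : Int) : genLadder n = genLadder_alt n := by
  by_cases h : n ≤ 0
  · unfold genLadder genLadder_alt
    rw [PySem.List.pyRange_one_eq_nil (by omega)]
    rfl
  · have hcast : ((n.toNat : Nat) : Int) = n := Int.toNat_of_nonneg (by omega)
    unfold genLadder genLadder_alt
    have := lad_invariant n (by omega) n.toNat (by omega)
    rw [hcast] at this
    rw [this]
    simp only
    rw [List.zip_map']
    rw [List.map_map]
    rfl

-- ===== VERDICT (by name: the statement is the Claim_ definition above) =====
theorem genLadder_spec : Claim_equal_genLadder := by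
  intro n _
  unfold Spec_genLadder
  exact genLadder_eq_alt n
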